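-- pv_equiv track=rewrite | github.com/7shoe/dataprep | code/user_preference_survey/.ipynb_checkpoints/sampling_utils-checkpoint.py | order_tuples
-- ===== SOURCE A (Python) =====
-- from collections import Counter
--
-- def order_tuples(tuples_list):
--     """
--     Order tuples in a way that makes the binary comparisons as similar as possible
--     (e.g. same text on the same side and within consecutive comparison) to reduce exhaustion
--     of users
--     """
--     # Step 1: Flatten the list and count the frequency of each item
--     flat_list = [item for t in tuples_list for item in t]
--     frequency = Counter(flat_list)
--
--     # Step 2: Identify the most frequent item
--     most_frequent = frequency.most_common(1)[0][0]
--
--     # Step 3: Separate tuples that contain the most frequent item and those that don't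
--     with_frequent = []
--     without_frequent = []
--
--     for t in tuples_list:
--         if most_frequent in t:
--             # Ensure the most frequent item is always in the first position
--             if t[1] == most_frequent:
--                 with_frequent.append((t[1], t[0]))
--             else:
--                 with_frequent.append(t)
--         else:
--             without_frequent.append(t)
--
--     # Step 4: Sort the tuples containing the most frequent item for consecutive appearance
--     with_frequent.sort(key=lambda x: x[1])
--
--     # Step 5: Combine the ordered tuples
--     ordered_list = with_frequent + without_frequent
--
--     return ordered_list
-- ===== SOURCE B (Python) =====
-- from collections import Counter
--
-- def order_tuples(tuples_list):
--     frequency = Counter(item for t in tuples_list for item in t)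
--     most_frequent = frequency.most_common(1)[0][0]
--     canonical = [(t[1], t[0]) if t[1] == most_frequent else t
--                  for t in tuples_list]
--     return sorted(canonical,
--                   key=lambda t: (0, t[1]) if most_frequent in t else (1, ''))
-- ===== Notes on version B (the rewrite author's own statement) =====
-- stated objective: alternative
-- what changed: A partitions the tuples into two lists with a loop and sorts only the first; B canonicalises every tuple once and performs a single stable sort of the whole list under a composite (class, partner) key, relying on sort stability to keep the non-frequent tuples in original order.
-- outside the precondition, e.g. on order_tuples([]): A raises IndexError, B raises IndexError
import Mathlib
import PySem

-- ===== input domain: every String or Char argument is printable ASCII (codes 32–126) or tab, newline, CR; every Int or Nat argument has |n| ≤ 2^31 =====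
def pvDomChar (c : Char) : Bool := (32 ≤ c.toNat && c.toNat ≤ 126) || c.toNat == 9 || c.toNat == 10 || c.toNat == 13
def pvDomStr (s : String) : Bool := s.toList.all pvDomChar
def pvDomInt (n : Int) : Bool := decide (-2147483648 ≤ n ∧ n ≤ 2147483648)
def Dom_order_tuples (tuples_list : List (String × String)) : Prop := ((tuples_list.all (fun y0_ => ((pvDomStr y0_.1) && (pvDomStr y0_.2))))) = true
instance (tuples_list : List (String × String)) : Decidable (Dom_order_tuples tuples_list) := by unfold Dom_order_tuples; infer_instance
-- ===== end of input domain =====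

-- B replaces A's partition-into-two-lists-then-sort-one by a single stable sort of the
-- canonicalised list under a composite (class, partner) key (different decomposition, same cost).

-- ===== PORT A =====
-- frequency.most_common(1)[0][0]: CPython's most_common(1) is heapq.nlargest(1, items,
-- key=itemgetter(1)), documented equivalent to sorted(items, key, reverse=True)[:1] (stable).
def order_tuples (tuples_list : List (String × String)) : List (String × String) :=
  let flat_list : List String := tuples_list.flatMap (fun t => [t.1, t.2])
  let frequency := PySem.Dict.counter flat_list
  match (PySem.List.sorted frequency.items (fun p => p.2) true).head? with
  | none => []          -- unreachable under Pre_ (Python raises IndexError on [])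
  | some top =>
    let most_frequent := top.1
    let acc := tuples_list.foldl
      (fun (s : List (String × String) × List (String × String)) t =>
        if t.1 == most_frequent || t.2 == most_frequent then
          if t.2 == most_frequent then (s.1 ++ [(t.2, t.1)], s.2)
          else (s.1 ++ [t], s.2)
        else (s.1, s.2 ++ [t]))
      ([], [])
    PySem.List.sorted acc.1 (fun x => x.2) false ++ acc.2

-- ===== PORT B =====
def order_tuples_alt (tuples_list : List (String × String)) : List (String × String) :=
  let frequency := PySem.Dict.counter (tuples_list.flatMap (fun t => [t.1, t.2]))
  match (PySem.List.sorted frequency.items (fun p => p.2) true).head? with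
  | none => []          -- unreachable under Pre_ (Python raises IndexError on [])
  | some top =>
    let most_frequent := top.1
    let canonical := tuples_list.map
      (fun t => if t.2 == most_frequent then (t.2, t.1) else t)
    -- key=lambda t: (0, t[1]) if most_frequent in t else (1, '')  (tuple key -> sorted2)
    PySem.List.sorted2 canonical
      (fun t => if t.1 == most_frequent || t.2 == most_frequent then (0 : Int) else 1)
      (fun t => if t.1 == most_frequent || t.2 == most_frequent then t.2 else "")
      false

-- ===== PRECONDITION & SPEC =====
-- Pre_ excludes only the empty list, on which A raises IndexError (most_common(1)[0]).
def Pre_order_tuples (tuples_list : List (String × String)) : Prop := tuples_list ≠ []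
instance (tuples_list : List (String × String)) : Decidable (Pre_order_tuples tuples_list) := by unfold Pre_order_tuples; infer_instance
def pvWitness_order_tuples : (List (String × String)) := [("a", "b"), ("c", "a")]

def Spec_order_tuples (tuples_list : List (String × String)) (out : List (String × String)) : Prop := out = order_tuples_alt tuples_list
instance (tuples_list : List (String × String)) (out : List (String × String)) : Decidable (Spec_order_tuples tuples_list out) := by unfold Spec_order_tuples; infer_instance

-- ===== CLAIM (what is proved, stated in full; the proofs are below) =====
def Claim_equal_order_tuples : Prop := ∀ (tuples_list : List (String × String)), Dom_order_tuples tuples_list → Pre_order_tuples tuples_list → Spec_order_tuples tuples_list (order_tuples tuples_list)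

-- ===== LEMMAS AND PROOFS =====

-- the two comparison predicates: B's composite-key "strictly before" and A's plain partner-key one
def pvB2 {α : Type} (P : α → Bool) (key : α → String) : α → α → Bool := fun a c =>
  decide ((if P a then (0 : Int) else 1) < (if P c then (0 : Int) else 1)) ||
  (!decide ((if P c then (0 : Int) else 1) < (if P a then (0 : Int) else 1)) &&
    decide ((if P a then key a else "") < (if P c then key c else "")))

def pvB1 {α : Type} (key : α → String) : α → α → Bool := fun a c => decide (key a < key c)

lemma pvB2_tt {α : Type} (P : α → Bool) (key : α → String) (a c : α)
    (ha : P a = true) (hc : P c = true) : pvB2 P key a c = pvB1 key a c := by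
  simp [pvB2, pvB1, ha, hc]

lemma pvB2_tf {α : Type} (P : α → Bool) (key : α → String) (a c : α)
    (ha : P a = true) (hc : P c = false) : pvB2 P key a c = true := by
  simp [pvB2, ha, hc]

lemma pvB2_f {α : Type} (P : α → Bool) (key : α → String) (a c : α)
    (ha : P a = false) : pvB2 P key a c = false := by
  by_cases hc : P c = true
  · simp [pvB2, ha, hc]
  · simp only [Bool.not_eq_true] at hc
    simp [pvB2, ha, hc]

-- insertBy only compares the inserted element with list members:
lemma pv_insertBy_congr {α : Type} (b b' : α → α → Bool) (x : α) (l : List α)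
    (h : ∀ y ∈ l, b x y = b' x y) :
    PySem.List.insertBy b x l = PySem.List.insertBy b' x l := by
  induction l with
  | nil => rfl
  | cons y ys ih =>
    simp only [PySem.List.insertBy]
    rw [h y (List.mem_cons_self ..), ih (fun z hz => h z (List.mem_cons_of_mem _ hz))]

lemma pv_insertBy_append_of_all_before {α : Type} (b : α → α → Bool) (x : α) (w o : List α)
    (h : ∀ y ∈ o, b x y = true) :
    PySem.List.insertBy b x (w ++ o) = PySem.List.insertBy b x w ++ o := by
  induction w with
  | nil =>
    cases o with
    | nil => rfl
    | cons z os => simp [PySem.List.insertBy, h z (List.mem_cons_self ..)]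
  | cons y ys ih =>
    simp only [List.cons_append, PySem.List.insertBy]
    rw [ih]
    by_cases hb : b x y = true <;> simp [hb]

-- The stable insertion under the composite key keeps the class-0 bucket (insertion-sorted by the
-- partner key) in front of the class-1 bucket (original order, appended at the back).
lemma pv_bucket_fold {α : Type} (P : α → Bool) (key : α → String) (l : List α) :
    ∀ (w o : List α), (∀ y ∈ w, P y = true) → (∀ y ∈ o, P y = false) →
    l.foldl (fun acc x => PySem.List.insertBy (pvB2 P key) x acc) (w ++ o)
    = (l.filter P).foldl (fun acc x => PySem.List.insertBy (pvB1 key) x acc) w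
      ++ (o ++ l.filter (fun x => !P x)) := by
  induction l with
  | nil => intro w o hw ho; simp
  | cons x xs ih =>
    intro w o hw ho
    by_cases hP : P x = true
    · have h1 : PySem.List.insertBy (pvB2 P key) x (w ++ o)
          = PySem.List.insertBy (pvB1 key) x w ++ o := by
        rw [pv_insertBy_append_of_all_before (pvB2 P key) x w o
          (fun y hy => pvB2_tf P key x y hP (ho y hy))]
        congr 1
        apply pv_insertBy_congr
        intro y hy
        exact pvB2_tt P key x y hP (hw y hy)
      have hw' : ∀ y ∈ PySem.List.insertBy (pvB1 key) x w, P y = true := by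
        intro y hy
        rcases (PySem.List.mem_insertBy ..).1 hy with h | h
        · simpa [h] using hP
        · exact hw y h
      simp only [List.foldl_cons, h1]
      rw [ih (PySem.List.insertBy (pvB1 key) x w) o hw' ho]
      simp [hP]
    · have hPf : P x = false := by simpa using hP
      have h1 : PySem.List.insertBy (pvB2 P key) x (w ++ o) = w ++ (o ++ [x]) := by
        rw [PySem.List.insertBy_of_forall_not_before]
        · simp
        · intro y hy
          simp [pvB2_f P key x y hPf]
      simp only [List.foldl_cons, h1]
      have ho' : ∀ y ∈ o ++ [x], P y = false := by
        intro y hy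
        rcases List.mem_append.1 hy with h | h
        · exact ho y h
        · simp only [List.mem_singleton] at h; simpa [h] using hPf
      rw [ih w (o ++ [x]) hw ho']
      simp [hPf]

lemma pv_bucket {α : Type} (P : α → Bool) (key : α → String) (m : List α) :
    PySem.List.sorted2 m
      (fun x => if P x then (0 : Int) else 1)
      (fun x => if P x then key x else "") false
    = PySem.List.sorted (m.filter P) key false ++ m.filter (fun x => !P x) := by
  rw [PySem.List.sorted_eq_foldl_insertBy]
  have h := pv_bucket_fold P key m [] []
    (by intro y hy; simp at hy) (by intro y hy; simp at hy)
  exact h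

-- the two ports agree for ANY value of most_frequent
lemma pv_main (mf : String) (l : List (String × String)) :
    PySem.List.sorted
      (l.foldl
        (fun (s : List (String × String) × List (String × String)) t =>
          if t.1 == mf || t.2 == mf then
            if t.2 == mf then (s.1 ++ [(t.2, t.1)], s.2)
            else (s.1 ++ [t], s.2)
          else (s.1, s.2 ++ [t]))
        ([], [])).1 (fun x => x.2) false
    ++ (l.foldl
        (fun (s : List (String × String) × List (String × String)) t =>
          if t.1 == mf || t.2 == mf then
            if t.2 == mf then (s.1 ++ [(t.2, t.1)], s.2)
            else (s.1 ++ [t], s.2)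
          else (s.1, s.2 ++ [t]))
        ([], [])).2
    = PySem.List.sorted2 (l.map (fun t => if t.2 == mf then (t.2, t.1) else t))
        (fun t => if t.1 == mf || t.2 == mf then (0 : Int) else 1)
        (fun t => if t.1 == mf || t.2 == mf then t.2 else "")
        false := by
  set P : String × String → Bool := fun t => t.1 == mf || t.2 == mf with hP
  set c : String × String → String × String := fun t => if t.2 == mf then (t.2, t.1) else t with hc
  -- A's loop is a pair of append-loops: the canonicalised P-bucket and the rest
  have hstep : (fun (s : List (String × String) × List (String × String)) t =>
      if t.1 == mf || t.2 == mf then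
        if t.2 == mf then (s.1 ++ [(t.2, t.1)], s.2)
        else (s.1 ++ [t], s.2)
      else (s.1, s.2 ++ [t]))
      = fun s t => (if P t then s.1 ++ [c t] else s.1,
                    if !P t then s.2 ++ [t] else s.2) := by
    funext s t
    by_cases h2 : t.2 == mf
    · have h2' : t.2 = mf := by simpa using h2
      simp [hP, hc, h2']
    · have h2' : ¬ t.2 = mf := by simpa using h2
      by_cases h1 : t.1 == mf <;> simp [hP, hc, h1, h2']
  rw [hstep,
      PySem.List.foldl_prod_mk (f := fun acc x => if P x then acc ++ [c x] else acc)
        (g := fun acc x => if !P x then acc ++ [x] else acc),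
      PySem.List.foldl_append_if, PySem.List.foldl_append_if_eq_filter]
  -- B's single composite-key sort splits into the two buckets
  have hPc : ∀ t ∈ l, P (c t) = P t := by
    intro t _
    by_cases h2 : t.2 == mf
    · have h2' : t.2 = mf := by simpa using h2
      simp [hP, hc, h2']
    · have h2' : ¬ t.2 = mf := by simpa using h2
      simp [hc, h2']
  have hk1 : (fun t => if t.1 == mf || t.2 == mf then (0 : Int) else 1)
      = fun t => if P t then (0 : Int) else 1 := rfl
  have hk2 : (fun t => if t.1 == mf || t.2 == mf then (t : String × String).2 else "")
      = fun t => if P t then (t : String × String).2 else "" := rfl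
  rw [hk1, hk2, pv_bucket P (fun x => x.2) (l.map c)]
  -- the two buckets of the canonicalised list are A's two lists
  have hf1 : (l.map c).filter P = (l.filter P).map c := by
    rw [List.filter_map]
    congr 1
    exact List.filter_congr (fun t ht => hPc t ht)
  have hf2 : (l.map c).filter (fun x => !P x) = l.filter (fun t => !P t) := by
    rw [List.filter_map]
    have : l.filter ((fun x => !P x) ∘ c) = l.filter (fun t => !P t) :=
      List.filter_congr (fun t ht => by simp [Function.comp, hPc t ht])
    rw [this]
    have : ∀ t ∈ l.filter (fun t => !P t), c t = t := by
      intro t ht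
      have := (List.mem_filter.1 ht).2
      have h2' : ¬ t.2 = mf := by
        intro hcon
        simp [hP, hcon] at this
      simp [hc, h2']
    calc (l.filter (fun t => !P t)).map c
        = (l.filter (fun t => !P t)).map id := List.map_congr_left (fun t ht => this t ht)
      _ = l.filter (fun t => !P t) := by simp
  rw [hf1, hf2]
  simp

-- ===== VERDICT (by name: the statement is the Claim_ definition above) =====
theorem order_tuples_spec : Claim_equal_order_tuples := by
  intro l _ _
  show order_tuples l = order_tuples_alt l
  simp only [order_tuples, order_tuples_alt]
  cases hmc : (PySem.List.sorted
      (PySem.Dict.counter (l.flatMap (fun t => [t.1, t.2]))).items (fun p => p.2) true).head? with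
  | none => rfl
  | some top => exact pv_main top.1 l
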